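-- pv_equiv track=rewrite | github.com/arvindmittursundararajan/flight-fixer | agents/aircraft_maintenance_agent.py | _estimate_recovery_time
-- ===== SOURCE A (Python) =====
-- def _estimate_recovery_time(maintenance_needs):
--     """Estimate total recovery time"""
--     if not maintenance_needs:
--         return "No maintenance required"
--
--     max_duration = 0
--     for need in maintenance_needs:
--         duration_str = need.get("estimated_duration", "2 hours")
--         # Extract hours from duration string
--         hours = 2  # Default
--         if "4-8" in duration_str:
--             hours = 8
--         elif "1-2" in duration_str:
--             hours = 2
--         max_duration = max(max_duration, hours)
--
--     return f"{max_duration} hours"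
-- ===== SOURCE B (Python) =====
-- def _estimate_recovery_time(maintenance_needs):
--     """Estimate total recovery time"""
--     if not maintenance_needs:
--         return "No maintenance required"
--     heavy = any("4-8" in need.get("estimated_duration", "2 hours")
--                 for need in maintenance_needs)
--     return "8 hours" if heavy else "2 hours"
-- ===== Notes on version B (the rewrite author's own statement) =====
-- stated objective: simpler
-- what changed: Replaces the numeric running-max accumulator loop with a single short-circuiting any(...) existence test: the per-item hours are only ever 2 or 8, so the answer is '8 hours' iff some need's duration string contains '4-8', else '2 hours'.
import Mathlib
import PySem

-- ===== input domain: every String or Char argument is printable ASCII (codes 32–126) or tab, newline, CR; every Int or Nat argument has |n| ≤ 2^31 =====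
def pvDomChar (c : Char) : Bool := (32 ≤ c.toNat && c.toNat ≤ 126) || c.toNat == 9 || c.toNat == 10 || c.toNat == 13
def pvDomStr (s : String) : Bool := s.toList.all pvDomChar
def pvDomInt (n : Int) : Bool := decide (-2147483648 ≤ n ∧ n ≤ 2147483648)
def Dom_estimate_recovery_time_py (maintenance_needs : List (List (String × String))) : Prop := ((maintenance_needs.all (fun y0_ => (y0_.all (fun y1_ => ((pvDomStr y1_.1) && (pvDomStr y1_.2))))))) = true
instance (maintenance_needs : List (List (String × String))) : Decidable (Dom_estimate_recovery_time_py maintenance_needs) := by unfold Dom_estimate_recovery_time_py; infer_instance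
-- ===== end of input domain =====

-- B replaces A's numeric running-max loop with a single any(...) existence test
-- (per-item hours are only ever 2 or 8): objective = simpler.

-- ===== PORT A =====
-- duration_str = need.get("estimated_duration", "2 hours"); hours = 2 / 8 / 2 by the branch chain
def pvHoursA (need : List (String × String)) : Int :=
  let duration_str := (PySem.Dict.mk need).getD "estimated_duration" "2 hours"
  if PySem.Str.isIn "4-8" duration_str then 8
  else if PySem.Str.isIn "1-2" duration_str then 2
  else 2

def estimate_recovery_time_py (maintenance_needs : List (List (String × String))) : String :=
  if maintenance_needs = [] then "No maintenance required"
  else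
    let max_duration : Int :=
      maintenance_needs.foldl (fun max_duration need => max max_duration (pvHoursA need)) 0
    PySem.Int.toStr max_duration ++ " hours"

-- ===== PORT B =====
def pvHeavyB (need : List (String × String)) : Bool :=
  PySem.Str.isIn "4-8" ((PySem.Dict.mk need).getD "estimated_duration" "2 hours")

def estimate_recovery_time_py_alt (maintenance_needs : List (List (String × String))) : String :=
  if maintenance_needs = [] then "No maintenance required"
  else if maintenance_needs.any pvHeavyB then "8 hours" else "2 hours"

-- ===== PRECONDITION & SPEC =====
def Spec_estimate_recovery_time_py (maintenance_needs : List (List (String × String))) (out : String) : Prop := out = estimate_recovery_time_py_alt maintenance_needs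
instance (maintenance_needs : List (List (String × String))) (out : String) : Decidable (Spec_estimate_recovery_time_py maintenance_needs out) := by unfold Spec_estimate_recovery_time_py; infer_instance

-- ===== CLAIM (what is proved, stated in full; the proofs are below) =====
def Claim_equal_estimate_recovery_time_py : Prop := ∀ (maintenance_needs : List (List (String × String))), Dom_estimate_recovery_time_py maintenance_needs → Spec_estimate_recovery_time_py maintenance_needs (estimate_recovery_time_py maintenance_needs)

-- ===== LEMMAS AND PROOFS =====

-- pvHoursA in terms of pvHeavyB: 8 when heavy, else 2 (both branches of A's elif give 2).
theorem pvHoursA_eq (need : List (String × String)) :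
    pvHoursA need = if pvHeavyB need then 8 else 2 := by
  unfold pvHoursA pvHeavyB
  by_cases h : PySem.Str.isIn "4-8" ((PySem.Dict.mk need).getD "estimated_duration" "2 hours") = true
  · simp only [h, if_true]
  · simp only [if_neg h]
    split <;> rfl

-- A's fold computes 8 if some need is heavy, else keeps a, for any accumulator 2 ≤ a ≤ 8.
theorem pvFold_char (l : List (List (String × String))) (a : Int) (h2 : 2 ≤ a) (h8 : a ≤ 8) :
    l.foldl (fun max_duration need => max max_duration (pvHoursA need)) a
      = if l.any pvHeavyB then 8 else a := by
  induction l generalizing a with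
  | nil => simp
  | cons hd tl ih =>
    simp only [List.foldl_cons, List.any_cons, pvHoursA_eq hd]
    by_cases h : pvHeavyB hd = true
    · simp only [h, if_true, Bool.true_or, max_eq_right (by omega : a ≤ (8:Int))]
      rw [ih 8 (by omega) (by omega)]
      simp
    · rw [Bool.not_eq_true] at h
      simp only [h, Bool.false_or, Bool.false_eq_true, if_false, max_eq_left (by omega : (2:Int) ≤ a)]
      exact ih a h2 h8

-- ===== VERDICT (by name: the statement is the Claim_ definition above) =====
theorem estimate_recovery_time_py_spec : Claim_equal_estimate_recovery_time_py := by
  intro l _hd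
  unfold Spec_estimate_recovery_time_py estimate_recovery_time_py estimate_recovery_time_py_alt
  by_cases h : l = []
  · simp [h]
  · obtain ⟨hd, tl, rfl⟩ := List.exists_cons_of_ne_nil h
    simp only [if_neg h, List.foldl_cons, pvHoursA_eq hd, List.any_cons]
    by_cases hh : pvHeavyB hd = true
    · simp only [hh, if_true, Bool.true_or]
      have h8 : max (0:Int) 8 = 8 := by decide
      rw [h8, pvFold_char tl 8 (by omega) (by omega)]
      split <;> rfl
    · rw [Bool.not_eq_true] at hh
      simp only [hh, Bool.false_eq_true, if_false, Bool.false_or]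
      have hm : max (0:Int) 2 = 2 := by decide
      rw [hm, pvFold_char tl 2 (by omega) (by omega)]
      split <;> rfl
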